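-- pv_equiv track=rewrite | github.com/octopode/spectackler | stash/solve_checksum.py | extract_packets
-- ===== SOURCE A (Python) =====
-- def extract_packets(hex_stream):
--     reading = False
--     packet = []
--     packets = []
--     for byte in hex_stream:
--         # comparison seems to work only in decimal!?!
--         if byte == 2:
--             reading = True
--         if reading == True:
--             packet.append(hex(byte))
--         if byte == 134:
--             reading = False
--             packets.append(packet)
--             packet = []
--
--     return packets
-- ===== SOURCE B (Python) =====
-- def extract_packets(hex_stream):
--     # Split-then-process: cut the stream into segments each ending at (and
--     # including) a 134 byte; trailing bytes after the last 134 are dropped.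
--     segments = []
--     current = []
--     for byte in hex_stream:
--         current.append(byte)
--         if byte == 134:
--             segments.append(current)
--             current = []
--     return [_packet_of(seg) for seg in segments]
--
-- def _packet_of(seg):
--     # Packet of one segment: hex of everything from the first 2 onward;
--     # a segment without a 2 yields an empty packet (as A does).
--     if 2 in seg:
--         i = seg.index(2)
--         return [hex(b) for b in seg[i:]]
--     return []
-- ===== Notes on version B (the rewrite author's own statement) =====
-- stated objective: simpler
-- what changed: replaces the stateful reading-flag loop by a split at 134-delimiters followed by per-segment processing (hex from the first 2 onward, empty if no 2)
import Mathlib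
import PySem

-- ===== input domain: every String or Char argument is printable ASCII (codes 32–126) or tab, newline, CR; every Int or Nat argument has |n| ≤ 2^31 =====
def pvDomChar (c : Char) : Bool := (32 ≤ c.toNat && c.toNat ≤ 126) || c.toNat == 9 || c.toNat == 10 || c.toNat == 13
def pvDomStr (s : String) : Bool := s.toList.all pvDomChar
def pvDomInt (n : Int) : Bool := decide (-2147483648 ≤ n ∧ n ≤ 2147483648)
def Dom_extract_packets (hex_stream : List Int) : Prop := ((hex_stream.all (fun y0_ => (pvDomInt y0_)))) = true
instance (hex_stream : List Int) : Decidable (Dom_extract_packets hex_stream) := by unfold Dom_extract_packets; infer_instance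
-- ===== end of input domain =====

-- B replaces A's stateful reading-flag loop by a split at 134-delimiters followed
-- by per-segment processing (objective: simpler decomposition, same cost).

-- Python's hex() builtin, ported by hand (exact for every Int: lowercase digits,
-- "0x" prefix, "-0x" for negatives); shared by both ports since both Pythons call hex().
def pvHexCore (n : Nat) : List Char :=
  if _h : n < 16 then [Nat.digitChar n]
  else pvHexCore (n / 16) ++ [Nat.digitChar (n % 16)]
  termination_by n
  decreasing_by exact Nat.div_lt_self (by omega) (by omega)

def pvHex (n : Int) : String :=
  if n < 0 then "-0x" ++ String.ofList (pvHexCore (-n).toNat)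
  else "0x" ++ String.ofList (pvHexCore n.toNat)

-- ===== PORT A =====
-- loop body of A: state = (reading, packet, packets)
def pvStepA (s : Bool × List String × List (List String)) (byte : Int) :
    Bool × List String × List (List String) :=
  let reading := if byte == 2 then true else s.1
  let packet := if reading == true then s.2.1 ++ [pvHex byte] else s.2.1
  if byte == 134 then (false, [], s.2.2 ++ [packet]) else (reading, packet, s.2.2)

def extract_packets (hex_stream : List Int) : List (List String) :=
  (hex_stream.foldl pvStepA (false, [], [])).2.2

-- ===== PORT B =====
-- loop body of B's splitting pass: state = (segments, current)
def pvStepB (s : List (List Int) × List Int) (byte : Int) :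
    List (List Int) × List Int :=
  let current := s.2 ++ [byte]
  if byte == 134 then (s.1 ++ [current], []) else (s.1, current)

-- _packet_of from Source B
def pvPacketOf (seg : List Int) : List String :=
  if seg.contains 2 then
    match PySem.List.index? seg 2 with
    | some i => (PySem.List.slice seg (some (i : Int)) none).map pvHex
    | none => []  -- unreachable: 2 ∈ seg
  else []

def extract_packets_alt (hex_stream : List Int) : List (List String) :=
  ((hex_stream.foldl pvStepB ([], [])).1).map pvPacketOf

-- ===== PRECONDITION & SPEC =====
def Spec_extract_packets (hex_stream : List Int) (out : List (List String)) : Prop := out = extract_packets_alt hex_stream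
instance (hex_stream : List Int) (out : List (List String)) : Decidable (Spec_extract_packets hex_stream out) := by unfold Spec_extract_packets; infer_instance

-- ===== CLAIM (what is proved, stated in full; the proofs are below) =====
def Claim_equal_extract_packets : Prop := ∀ (hex_stream : List Int), Dom_extract_packets hex_stream → Spec_extract_packets hex_stream (extract_packets hex_stream)

-- ===== LEMMAS AND PROOFS =====

lemma pvPacketOf_nil : pvPacketOf [] = [] := rfl

lemma pvPacketOf_eq_nil_of_not_mem (xs : List Int) (h : (2 : Int) ∉ xs) :
    pvPacketOf xs = [] := by
  unfold pvPacketOf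
  rw [if_neg (by simp [List.contains_eq_mem, h])]

-- recursive characterisation of _packet_of
lemma pvPacketOf_cons (b : Int) (r : List Int) :
    pvPacketOf (b :: r) = if b = 2 then (b :: r).map pvHex else pvPacketOf r := by
  unfold pvPacketOf
  by_cases hb : b = 2
  · subst hb
    rw [PySem.List.index?_cons_self]
    have hc : ((2 : Int) :: r).contains 2 = true := by simp [List.contains_eq_mem]
    rw [if_pos hc, if_pos rfl]
    show (PySem.List.slice ((2 : Int) :: r) (some ((0 : Nat) : Int)) none).map pvHex = _
    rw [PySem.List.slice_from_natCast]
    simp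
  · rw [PySem.List.index?_cons_of_ne r hb, if_neg hb]
    rcases h : PySem.List.index? r 2 with _ | i
    · have h2 : (2 : Int) ∉ r := by
        intro hm
        have := (PySem.List.index?_isSome_iff r 2).mpr hm
        rw [h] at this
        simp at this
      have hcr : r.contains 2 = false := by simp [List.contains_eq_mem, h2]
      have hcbr : ((b : Int) :: r).contains 2 = false := by
        simp [List.contains_eq_mem, h2, Ne.symm hb]
      simp [hcr]
    · have h2 : (2 : Int) ∈ r :=
        (PySem.List.index?_isSome_iff r 2).mp (by rw [h]; rfl)
      have hcr : r.contains 2 = true := by simp [List.contains_eq_mem, h2]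
      have hcbr : ((b : Int) :: r).contains 2 = true := by simp [List.contains_eq_mem, h2]
      rw [if_pos hcbr, if_pos hcr]
      simp only [Option.map_some]
      show List.map pvHex (PySem.List.slice (b :: r) (some ((i + 1 : Nat) : Int)) none)
        = List.map pvHex (PySem.List.slice r (some ((i : Nat) : Int)) none)
      rw [PySem.List.slice_from_natCast, PySem.List.slice_from_natCast]
      simp

lemma pvPacketOf_append (xs : List Int) (b : Int) :
    pvPacketOf (xs ++ [b]) =
      if (2 : Int) ∈ xs then pvPacketOf xs ++ [pvHex b]
      else if b = 2 then [pvHex b] else [] := by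
  induction xs with
  | nil => simp [pvPacketOf_cons, pvPacketOf_nil]
  | cons a xs ih =>
    by_cases ha : a = 2
    · subst ha
      rw [List.cons_append, pvPacketOf_cons, if_pos rfl, pvPacketOf_cons, if_pos rfl]
      simp
    · rw [List.cons_append, pvPacketOf_cons, if_neg ha, ih, pvPacketOf_cons, if_neg ha]
      simp [List.mem_cons, Ne.symm ha]

-- loop invariant: A's fold over the rest of the stream, started from a state
-- matching B's splitting state (segs, cur), yields the packets B computes.
lemma pvLoop (l : List Int) (cur : List Int) (segs : List (List Int)) :
    (l.foldl pvStepA (cur.contains 2, pvPacketOf cur, segs.map pvPacketOf)).2.2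
      = ((l.foldl pvStepB (segs, cur)).1).map pvPacketOf := by
  induction l generalizing cur segs with
  | nil => simp
  | cons b l ih =>
    have h2 : (if ((if (b == 2) = true then true else cur.contains 2) == true) = true
          then pvPacketOf cur ++ [pvHex b] else pvPacketOf cur)
        = pvPacketOf (cur ++ [b]) := by
      rw [pvPacketOf_append]
      by_cases hm : (2 : Int) ∈ cur
      · have hc : cur.contains 2 = true := by simp [List.contains_eq_mem, hm]
        simp [hm]
      · have hc : cur.contains 2 = false := by simp [List.contains_eq_mem, hm]
        have hnil : pvPacketOf cur = [] := pvPacketOf_eq_nil_of_not_mem cur hm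
        by_cases hb2 : b = 2
        · simp [hb2, hm, hnil]
        · simp [hm, hnil, hb2]
    have h1 : (if (b == 2) = true then true else cur.contains 2)
        = (cur ++ [b]).contains 2 := by
      by_cases hb2 : b = 2 <;>
        simp [List.contains_eq_mem, hb2, List.mem_append, Ne.symm]
    by_cases hb : b = 134
    · subst hb
      simp only [List.foldl_cons, pvStepA, pvStepB]
      rw [h2, h1]
      rw [if_pos (by decide), if_pos (by decide)]
      have hmap : (segs.map pvPacketOf ++ [pvPacketOf (cur ++ [(134 : Int)])])
          = (segs ++ [cur ++ [(134 : Int)]]).map pvPacketOf := by simp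
      rw [hmap]
      simpa [pvPacketOf_nil] using ih ([]) (segs ++ [cur ++ [(134 : Int)]])
    · have hb' : (b == 134) = false := by simpa using hb
      simp only [List.foldl_cons, pvStepA, pvStepB]
      rw [h2, h1, if_neg (by simp [hb']), if_neg (by simp [hb'])]
      exact ih (cur ++ [b]) segs

-- ===== VERDICT (by name: the statement is the Claim_ definition above) =====
theorem extract_packets_spec : Claim_equal_extract_packets := by
  intro hex_stream _
  show extract_packets hex_stream = extract_packets_alt hex_stream
  unfold extract_packets extract_packets_alt
  simpa [pvPacketOf_nil] using pvLoop hex_stream [] []
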